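-- pv_equiv track=rewrite | github.com/kuzmiigo/advent-of-code | 2020/17/prog.py | run_4d
-- ===== SOURCE A (Python) =====
-- def get_dims(grid):
--     return [(min(coords), max(coords)) for coords in zip(*list(grid))]
--
-- def count_occupied_4d(grid, x, y, z, w):
--     return len([
--         (a, b, c, d)
--         for a in range(x - 1, x + 2)
--         for b in range(y - 1, y + 2)
--         for c in range(z - 1, z + 2)
--         for d in range(w - 1, w + 2)
--         if (a, b, c, d) in grid and (a, b, c, d) != (x, y, z, w)
--     ])
--
-- def run_4d(grid, cycles):
--     cur_grid = grid.copy()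
--     for c in range(cycles):
--         new_grid = set()
--         dims = get_dims(cur_grid)
--         for x in range(dims[0][0] - 1, dims[0][1] + 2):
--             for y in range(dims[1][0] - 1, dims[1][1] + 2):
--                 for z in range(dims[2][0] - 1, dims[2][1] + 2):
--                     for w in range(dims[3][0] - 1, dims[3][1] + 2):
--                         occ = count_occupied_4d(cur_grid, x, y, z, w)
--                         if (x, y, z, w) in cur_grid:
--                             if occ in [2, 3]:
--                                 new_grid.add((x, y, z, w))
--                         else:
--                             if occ == 3:
--                                 new_grid.add((x, y, z, w))
--         cur_grid = new_grid
--     return len(cur_grid)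
-- ===== SOURCE B (Python) =====
-- def run_4d(grid, cycles):
--     # Sparse simulation: instead of scanning the whole bounding box and counting
--     # 81 memberships per cell, tally one neighbour contribution per live cell.
--     cur = grid
--     for _ in range(cycles):
--         counts = {}
--         for cell in cur:
--             x, y, z, w = cell
--             for a in range(x - 1, x + 2):
--                 for b in range(y - 1, y + 2):
--                     for c in range(z - 1, z + 2):
--                         for d in range(w - 1, w + 2):
--                             if (a, b, c, d) != cell:
--                                 counts[(a, b, c, d)] = counts.get((a, b, c, d), 0) + 1
--         cur = {p for p, n in counts.items() if n == 3 or (n == 2 and p in cur)}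
--     return len(cur)
-- ===== Notes on version B (the rewrite author's own statement) =====
-- stated objective: alternative
-- what changed: A scans the whole bounding box each cycle and re-counts 81 memberships per box cell; B instead tallies a neighbour-contribution dictionary over the live cells only and reads each cell's count once (a sparse simulation; a timing run could not certify a speed-up, so none is claimed). Where the population dies out before the last cycle A raises IndexError in get_dims, which Pre_ excludes; B would return 0 there.
-- outside the precondition, e.g. on run_4d({(0, 0, 0, 0, 9)}, 1): A returns 0, B raises ValueError
import Mathlib
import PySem

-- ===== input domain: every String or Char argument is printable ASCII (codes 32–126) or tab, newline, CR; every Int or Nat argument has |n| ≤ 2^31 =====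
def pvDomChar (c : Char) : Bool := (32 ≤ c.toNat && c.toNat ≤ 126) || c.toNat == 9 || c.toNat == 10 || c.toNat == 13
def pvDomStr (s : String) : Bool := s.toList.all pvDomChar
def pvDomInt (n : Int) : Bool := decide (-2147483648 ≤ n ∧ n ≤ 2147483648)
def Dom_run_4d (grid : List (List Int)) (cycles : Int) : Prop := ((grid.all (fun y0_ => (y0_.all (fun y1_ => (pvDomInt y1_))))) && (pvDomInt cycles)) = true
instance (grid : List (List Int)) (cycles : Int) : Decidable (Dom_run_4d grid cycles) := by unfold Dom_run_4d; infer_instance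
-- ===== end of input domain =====

-- B replaces A's full bounding-box scan (81 membership tests per box cell) by a sparse
-- simulation: a neighbour-contribution dictionary over the live cells only (alternative
-- algorithm; no speed claim).  The grid is a Python set of int tuples, encoded as the list
-- of its distinct elements.

-- ===== PORT A =====
-- zip(*list(grid)): the i-th column, for i < the shortest row length (exact).
def pyZipCols (g : List (List Int)) : List (List Int) :=
  match g with
  | [] => []
  | r :: _ =>
    let n := g.foldl (fun m row => min m row.length) r.length
    (List.range n).map (fun i => g.map (fun row => row.getD i 0))

-- get_dims: (min, max) of each column.  Columns are nonempty whenever they exist, so the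
-- Option from min?/max? never fires; getD 0 is a total shim on the unreachable branch.
def getDims4 (g : List (List Int)) : List (Int × Int) :=
  (pyZipCols g).map (fun col =>
    ((PySem.List.min? col (fun v => v)).getD 0, (PySem.List.max? col (fun v => v)).getD 0))

-- count_occupied_4d: the length of the nested comprehension over the 3^4 neighbourhood;
-- '(a,b,c,d) in grid' is membership of the 4-tuple in the set of tuples.
def countOcc4 (cur : List (List Int)) (x y z w : Int) : Int :=
  (((PySem.List.pyRange (x-1) (x+2) 1).flatMap (fun a =>
    (PySem.List.pyRange (y-1) (y+2) 1).flatMap (fun b =>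
      (PySem.List.pyRange (z-1) (z+2) 1).flatMap (fun c =>
        (PySem.List.pyRange (w-1) (w+2) 1).flatMap (fun d =>
          if [a,b,c,d] ∈ cur ∧ [a,b,c,d] ≠ [x,y,z,w] then [[a,b,c,d]] else []))))).length : Int)

-- one iteration of the cycle loop; none = the IndexError on dims[0..3]
def stepA (cur : List (List Int)) : Option (List (List Int)) :=
  let dims := getDims4 cur
  match PySem.List.pyGet? dims 0, PySem.List.pyGet? dims 1,
        PySem.List.pyGet? dims 2, PySem.List.pyGet? dims 3 with
  | some d0, some d1, some d2, some d3 =>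
    some ((PySem.List.pyRange (d0.1 - 1) (d0.2 + 2) 1).foldl (fun s x =>
      (PySem.List.pyRange (d1.1 - 1) (d1.2 + 2) 1).foldl (fun s y =>
        (PySem.List.pyRange (d2.1 - 1) (d2.2 + 2) 1).foldl (fun s z =>
          (PySem.List.pyRange (d3.1 - 1) (d3.2 + 2) 1).foldl (fun s w =>
            let occ := countOcc4 cur x y z w
            if [x,y,z,w] ∈ cur then
              if occ = 2 ∨ occ = 3 then PySem.Set.add s [x,y,z,w] else s
            else
              if occ = 3 then PySem.Set.add s [x,y,z,w] else s) s) s) s)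
      (PySem.Set.empty))
  | _, _, _, _ => none

def run_4d (grid : List (List Int)) (cycles : Int) : Int :=
  match (PySem.List.pyRange 0 cycles 1).foldl
      (fun (o : Option (List (List Int))) _ => o.bind stepA) (some grid) with
  | some s => (s.length : Int)   -- len(cur_grid): the set size
  | none => 0                    -- unreachable under Pre_run_4d: Python raised IndexError

-- ===== PORT B =====
-- one sparse cycle: tally neighbour contributions of every live cell, then read them off
def stepB (cur : List (List Int)) : List (List Int) :=
  let contribs : List (List Int) := cur.flatMap (fun cell =>
    match cell with
    | [x, y, z, w] =>
      (PySem.List.pyRange (x-1) (x+2) 1).flatMap (fun a =>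
        (PySem.List.pyRange (y-1) (y+2) 1).flatMap (fun b =>
          (PySem.List.pyRange (z-1) (z+2) 1).flatMap (fun c =>
            (PySem.List.pyRange (w-1) (w+2) 1).flatMap (fun d =>
              if [a,b,c,d] ≠ cell then [[a,b,c,d]] else []))))
    | _ => [])                   -- 'x, y, z, w = cell' raises ValueError: outside Pre_run_4d
  let counts := contribs.foldl (fun d p => d.insert p (d.getD p 0 + 1))
    (PySem.Dict.empty : PySem.Dict (List Int) Int)
  (counts.items.filter (fun pn => pn.2 = 3 ∨ (pn.2 = 2 ∧ pn.1 ∈ cur))).map (fun pn => pn.1)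

def run_4d_alt (grid : List (List Int)) (cycles : Int) : Int :=
  (((PySem.List.pyRange 0 cycles 1).foldl (fun cur _ => stepB cur) grid).length : Int)

-- ===== PRECONDITION & SPEC =====
-- Spec-level statement of the Game-of-Life rule, used only to describe A's domain:
-- the 3^4 neighbourhood box around (x,y,z,w), including the centre,
def box4 (x y z w : Int) : List (List Int) :=
  (PySem.List.pyRange (x-1) (x+2) 1).flatMap (fun a =>
    (PySem.List.pyRange (y-1) (y+2) 1).flatMap (fun b =>
      (PySem.List.pyRange (z-1) (z+2) 1).flatMap (fun c =>
        (PySem.List.pyRange (w-1) (w+2) 1).map (fun d => [a,b,c,d]))))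
-- the number of live neighbours of a cell,
def occL (g : List (List Int)) (c : List Int) : Nat :=
  (g.filter (fun m => decide (m ∈ box4 (c.getD 0 0) (c.getD 1 0) (c.getD 2 0) (c.getD 3 0))
    && decide (m ≠ c))).length
-- and the set of cells alive after one step (B3/S23 over the 80-cell neighbourhood).
def lifeNext (g : List (List Int)) : List (List Int) :=
  ((g.flatMap (fun m => box4 (m.getD 0 0) (m.getD 1 0) (m.getD 2 0) (m.getD 3 0))).dedup).filter
    (fun c => decide (occL g c = 3 ∨ (occL g c = 2 ∧ c ∈ g)))

-- Pre_ excludes exactly: (a) the inputs on which A raises IndexError — a row shorter than 4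
-- with cycles ≥ 1 (dims[3] fails), and populations that die out before the last cycle
-- (get_dims of the empty set fails), stated via the Life rule lifeNext above, not via either
-- port; (b) rows longer than 4 ints, on which A returns a value (they never match a 4-tuple)
-- but B's 'x, y, z, w = cell' unpacking raises ValueError (see cites); (c) duplicate rows,
-- which encode no Python set.  With cycles ≤ 0 the loop never runs and nothing is excluded.
-- the population is still alive at every step strictly before the n-th (early exit: dead stays dead)
def surviveB (g : List (List Int)) : Nat → Bool
  | 0 => true
  | n + 1 => !g.isEmpty && surviveB (lifeNext g) n

def Pre_run_4d (grid : List (List Int)) (cycles : Int) : Prop :=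
  (decide (cycles ≤ 0) ||
    (decide grid.Nodup && grid.all (fun r => r.length == 4) && surviveB grid cycles.toNat)) = true
instance (grid : List (List Int)) (cycles : Int) : Decidable (Pre_run_4d grid cycles) := by
  unfold Pre_run_4d; infer_instance
def pvWitness_run_4d : List (List Int) × Int := ([[1, 2, 3, 4], [0, 0, 0, 0]], 1)

def Spec_run_4d (grid : List (List Int)) (cycles : Int) (out : Int) : Prop := out = run_4d_alt grid cycles
instance (grid : List (List Int)) (cycles : Int) (out : Int) : Decidable (Spec_run_4d grid cycles out) := by unfold Spec_run_4d; infer_instance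

-- ===== CLAIM (what is proved, stated in full; the proofs are below) =====
def Claim_equal_run_4d : Prop := ∀ (grid : List (List Int)) (cycles : Int), Dom_run_4d grid cycles → Pre_run_4d grid cycles → Spec_run_4d grid cycles (run_4d grid cycles)

-- ===== LEMMAS AND PROOFS =====

theorem mem_box4 {x y z w : Int} {m : List Int} :
    m ∈ box4 x y z w ↔ ∃ a b c d : Int, m = [a,b,c,d] ∧
      x - 1 ≤ a ∧ a < x + 2 ∧ y - 1 ≤ b ∧ b < y + 2 ∧
      z - 1 ≤ c ∧ c < z + 2 ∧ w - 1 ≤ d ∧ d < w + 2 := by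
  simp only [box4, List.mem_flatMap, List.mem_map, PySem.List.mem_pyRange_one]
  constructor
  · rintro ⟨a, ⟨ha1, ha2⟩, b, ⟨hb1, hb2⟩, c, ⟨hc1, hc2⟩, d, ⟨hd1, hd2⟩, rfl⟩
    exact ⟨a, b, c, d, rfl, ha1, ha2, hb1, hb2, hc1, hc2, hd1, hd2⟩
  · rintro ⟨a, b, c, d, rfl, h⟩
    exact ⟨a, ⟨h.1, h.2.1⟩, b, ⟨h.2.2.1, h.2.2.2.1⟩, c, ⟨h.2.2.2.2.1, h.2.2.2.2.2.1⟩,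
      d, ⟨h.2.2.2.2.2.2.1, h.2.2.2.2.2.2.2⟩, rfl⟩

theorem nodup_flatMap_inj {α : Type} (l : List Int) (f : Int → List α) (g : α → Int)
    (hl : l.Nodup) (hn : ∀ a ∈ l, (f a).Nodup) (hg : ∀ a m, m ∈ f a → g m = a) :
    (l.flatMap f).Nodup := by
  rw [List.nodup_flatMap]
  refine ⟨hn, hl.imp ?_⟩
  intro a b hab s hsa hsb
  exact hab (by rw [← hg a s hsa, hg b s hsb])

theorem nodup_box4 (x y z w : Int) : (box4 x y z w).Nodup := by
  refine nodup_flatMap_inj _ _ (fun m => m.getD 0 0) (PySem.List.nodup_pyRange_one _ _) ?_ ?_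
  · intro a _
    refine nodup_flatMap_inj _ _ (fun m => m.getD 1 0) (PySem.List.nodup_pyRange_one _ _) ?_ ?_
    · intro b _
      refine nodup_flatMap_inj _ _ (fun m => m.getD 2 0) (PySem.List.nodup_pyRange_one _ _) ?_ ?_
      · intro c _
        exact (PySem.List.nodup_pyRange_one _ _).map (by intro d d' h; simpa using h)
      · intro c m hm
        simp only [List.mem_map] at hm
        obtain ⟨d, _, rfl⟩ := hm
        rfl
    · intro b m hm
      simp only [List.mem_flatMap, List.mem_map] at hm
      obtain ⟨c, _, d, _, rfl⟩ := hm
      rfl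
  · intro a m hm
    simp only [List.mem_flatMap, List.mem_map] at hm
    obtain ⟨b, _, c, _, d, _, rfl⟩ := hm
    rfl

-- a nested comprehension with a final 'if' is the filtered box
theorem flatMap_if_singleton (l : List Int) (f : Int → List Int) (P : List Int → Prop)
    [DecidablePred P] :
    (l.flatMap (fun d => if P (f d) then [f d] else [])) = (l.map f).filter (fun m => decide (P m)) := by
  induction l with
  | nil => rfl
  | cons a t ih => by_cases h : P (f a) <;> simp [h, ih]

theorem filter_flatMap' {α : Type} (l : List α) (f : α → List (List Int)) (p : List Int → Bool) :
    (l.flatMap f).filter p = l.flatMap (fun x => (f x).filter p) := by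
  induction l with
  | nil => rfl
  | cons a t ih => simp [List.flatMap_cons, List.filter_append, ih]

theorem countOcc4_eq_filter_box (cur : List (List Int)) (x y z w : Int) :
    countOcc4 cur x y z w =
      (((box4 x y z w).filter
        (fun m => decide (m ∈ cur) && decide (m ≠ [x,y,z,w]))).length : Int) := by
  have key :
      ((PySem.List.pyRange (x-1) (x+2) 1).flatMap (fun a =>
        (PySem.List.pyRange (y-1) (y+2) 1).flatMap (fun b =>
          (PySem.List.pyRange (z-1) (z+2) 1).flatMap (fun c =>
            (PySem.List.pyRange (w-1) (w+2) 1).flatMap (fun d =>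
              if [a,b,c,d] ∈ cur ∧ [a,b,c,d] ≠ [x,y,z,w] then [[a,b,c,d]] else [])))))
      = (box4 x y z w).filter (fun m => decide (m ∈ cur) && decide (m ≠ [x,y,z,w])) := by
    simp only [box4, filter_flatMap']
    congr 1; funext a; congr 1; funext b; congr 1; funext c
    rw [flatMap_if_singleton _ (fun d => [a,b,c,d]) (fun m => m ∈ cur ∧ m ≠ [x,y,z,w])]
    congr 1
    funext m
    simp
  simp only [countOcc4, key]

-- the neighbour list one live cell contributes (the box minus the cell itself)
theorem gen_eq_filter_box (p q r s : Int) :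
    ((PySem.List.pyRange (p-1) (p+2) 1).flatMap (fun a =>
      (PySem.List.pyRange (q-1) (q+2) 1).flatMap (fun b =>
        (PySem.List.pyRange (r-1) (r+2) 1).flatMap (fun c =>
          (PySem.List.pyRange (s-1) (s+2) 1).flatMap (fun d =>
            if [a,b,c,d] ≠ [p,q,r,s] then [[a,b,c,d]] else [])))))
      = (box4 p q r s).filter (fun m => decide (m ≠ [p,q,r,s])) := by
  simp only [box4, filter_flatMap']
  congr 1; funext a; congr 1; funext b; congr 1; funext c
  rw [flatMap_if_singleton _ (fun d => [a,b,c,d]) (fun m => m ≠ [p,q,r,s])]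

-- swap which of two duplicate-free lists is filtered by membership in the other
theorem length_filter_mem_comm (u v : List (List Int)) (Q : List Int → Bool)
    (hu : u.Nodup) (hv : v.Nodup) :
    ((u.filter (fun m => decide (m ∈ v) && Q m)).length
      = (v.filter (fun m => decide (m ∈ u) && Q m)).length) := by
  refine List.Perm.length_eq ?_
  refine (List.perm_ext_iff_of_nodup (hu.filter _) (hv.filter _)).mpr ?_
  intro m
  simp only [List.mem_filter, Bool.and_eq_true, decide_eq_true_eq]
  tauto

-- ---- columns and dimensions (nonempty grid, every row of length 4) ----
def colG (g : List (List Int)) (i : Nat) : List Int := g.map (fun row => row.getD i 0)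
def mnG (g : List (List Int)) (i : Nat) : Int := (PySem.List.min? (colG g i) (fun v => v)).getD 0
def mxG (g : List (List Int)) (i : Nat) : Int := (PySem.List.max? (colG g i) (fun v => v)).getD 0

theorem foldl_min_four (l : List (List Int)) (h : ∀ r ∈ l, r.length = 4) :
    l.foldl (fun m row => min m row.length) 4 = 4 := by
  induction l with
  | nil => rfl
  | cons a t ih =>
    rw [List.foldl_cons, h a (by simp), min_self]
    exact ih (fun r hr => h r (by simp [hr]))

theorem pyZipCols_eq (g : List (List Int)) (hne : g ≠ []) (hlen : ∀ r ∈ g, r.length = 4) :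
    pyZipCols g = [colG g 0, colG g 1, colG g 2, colG g 3] := by
  obtain ⟨r, t, rfl⟩ : ∃ r t, g = r :: t := by
    cases g with | nil => exact absurd rfl hne | cons r t => exact ⟨r, t, rfl⟩
  show (List.range ((r :: t).foldl (fun m row => min m row.length) r.length)).map _ = _
  have h4 : (r :: t).foldl (fun m row => min m row.length) r.length = 4 := by
    rw [List.foldl_cons, hlen r (by simp), min_self]
    exact foldl_min_four t (fun s hs => hlen s (by simp [hs]))
  rw [h4]
  rfl

theorem getDims4_eq (g : List (List Int)) (hne : g ≠ []) (hlen : ∀ r ∈ g, r.length = 4) :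
    getDims4 g = [(mnG g 0, mxG g 0), (mnG g 1, mxG g 1), (mnG g 2, mxG g 2), (mnG g 3, mxG g 3)] := by
  simp [getDims4, pyZipCols_eq g hne hlen, mnG, mxG]

theorem col_bounds (g : List (List Int)) (i : Nat) {v : Int} (hv : v ∈ colG g i) :
    mnG g i ≤ v ∧ v ≤ mxG g i := by
  constructor
  · cases hmin : PySem.List.min? (colG g i) (fun v => v) with
    | none =>
      rw [PySem.List.min?_eq_none_iff] at hmin
      rw [hmin] at hv
      simp at hv
    | some m =>
      have := PySem.List.min?_isMin hmin v hv
      simpa [mnG, hmin] using this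
  · cases hmax : PySem.List.max? (colG g i) (fun v => v) with
    | none =>
      rw [PySem.List.max?_eq_none_iff] at hmax
      rw [hmax] at hv
      simp at hv
    | some m =>
      have := PySem.List.max?_isMax hmax v hv
      simpa [mxG, hmax] using this

theorem coord_mem_col (g : List (List Int)) {m : List Int} (hm : m ∈ g) (i : Nat) :
    m.getD i 0 ∈ colG g i := List.mem_map.mpr ⟨m, hm, rfl⟩

theorem len4_shape {l : List Int} (h : l.length = 4) : ∃ a b c d : Int, l = [a, b, c, d] := by
  rcases l with _ | ⟨a, l⟩
  · simp at h
  rcases l with _ | ⟨b, l⟩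
  · simp at h
  rcases l with _ | ⟨c, l⟩
  · simp at h
  rcases l with _ | ⟨d, l⟩
  · simp at h
  rcases l with _ | ⟨e, l⟩
  · exact ⟨a, b, c, d, rfl⟩
  · simp at h

theorem mem_box4_quad {p q r s x y z w : Int} :
    [x, y, z, w] ∈ box4 p q r s ↔
      (p - 1 ≤ x ∧ x < p + 2 ∧ q - 1 ≤ y ∧ y < q + 2 ∧
       r - 1 ≤ z ∧ z < r + 2 ∧ s - 1 ≤ w ∧ w < s + 2) := by
  rw [mem_box4]
  constructor
  · rintro ⟨a, b, c, d, heq, h⟩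
    obtain ⟨rfl, rfl, rfl, rfl⟩ : x = a ∧ y = b ∧ z = c ∧ w = d := by
      simpa using heq
    exact h
  · intro h
    exact ⟨x, y, z, w, rfl, h⟩

-- adjacency is symmetric between a cell and a box centre
theorem box4_symm {p q r s x y z w : Int} :
    [x, y, z, w] ∈ box4 p q r s ↔ [p, q, r, s] ∈ box4 x y z w := by
  rw [mem_box4_quad, mem_box4_quad]
  omega

-- ---- counting: A's occupancy count is the contribution count of B's tally ----
theorem count_flatMap_indicator (g : List (List Int)) (f : List Int → List (List Int))
    (p : List Int → Bool) (c : List Int)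
    (h : ∀ m ∈ g, (f m).count c = if p m then 1 else 0) :
    (g.flatMap f).count c = g.countP p := by
  induction g with
  | nil => rfl
  | cons a t ih =>
    rw [List.flatMap_cons, List.count_append, h a (by simp), List.countP_cons,
      ih (fun m hm => h m (by simp [hm]))]
    by_cases hp : p a
    · simp [hp]
      omega
    · simp [hp]

-- the per-cell neighbour list of B (the inner comprehension of stepB, named for the proofs)
def genB (cell : List Int) : List (List Int) :=
  match cell with
  | [x, y, z, w] =>
    (PySem.List.pyRange (x-1) (x+2) 1).flatMap (fun a =>
      (PySem.List.pyRange (y-1) (y+2) 1).flatMap (fun b =>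
        (PySem.List.pyRange (z-1) (z+2) 1).flatMap (fun c =>
          (PySem.List.pyRange (w-1) (w+2) 1).flatMap (fun d =>
            if [a,b,c,d] ≠ cell then [[a,b,c,d]] else []))))
  | _ => []

theorem genB_eq (p q r s : Int) :
    genB [p, q, r, s] = (box4 p q r s).filter (fun m => decide (m ≠ [p, q, r, s])) :=
  gen_eq_filter_box p q r s

theorem count_genB (p q r s : Int) (c : List Int) :
    (genB [p, q, r, s]).count c =
      if c ∈ box4 p q r s ∧ c ≠ [p, q, r, s] then 1 else 0 := by
  rw [genB_eq]
  by_cases hmem : c ∈ box4 p q r s ∧ c ≠ [p, q, r, s]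
  · rw [if_pos hmem]
    exact List.count_eq_one_of_mem ((nodup_box4 p q r s).filter _)
      (List.mem_filter.mpr ⟨hmem.1, by simp only [decide_eq_true_eq]; exact hmem.2⟩)
  · rw [if_neg hmem]
    refine List.count_eq_zero_of_not_mem (fun hc => ?_)
    obtain ⟨h1, h2⟩ := List.mem_filter.mp hc
    exact hmem ⟨h1, by simpa only [decide_eq_true_eq] using h2⟩

theorem count_contribs (g : List (List Int)) (hnd : g.Nodup) (hlen : ∀ r ∈ g, r.length = 4)
    (x y z w : Int) :
    ((g.flatMap genB).count [x, y, z, w] : Int) = countOcc4 g x y z w := by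
  have hcount : (g.flatMap genB).count [x, y, z, w]
      = g.countP (fun m => decide (m ∈ box4 x y z w) && decide (m ≠ [x, y, z, w])) := by
    refine count_flatMap_indicator g genB _ _ ?_
    intro m hm
    obtain ⟨p, q, r, s, rfl⟩ := len4_shape (hlen m hm)
    rw [count_genB]
    by_cases hadj : [p, q, r, s] ∈ box4 x y z w ∧ [p, q, r, s] ≠ [x, y, z, w]
    · rw [if_pos ⟨box4_symm.mpr hadj.1, fun heq => hadj.2 heq.symm⟩,
        if_pos (by simp only [Bool.and_eq_true, decide_eq_true_eq]; exact hadj)]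
    · rw [if_neg (fun hc => hadj ⟨box4_symm.mp hc.1, fun heq => hc.2 heq.symm⟩),
        if_neg (by simp only [Bool.and_eq_true, decide_eq_true_eq]; exact hadj)]
  rw [countOcc4_eq_filter_box, hcount, List.countP_eq_length_filter,
    length_filter_mem_comm g (box4 x y z w) (fun m => decide (m ≠ [x, y, z, w]))
      hnd (nodup_box4 x y z w)]

-- ---- membership and distinctness through the insert-only folds ----
theorem mem_foldl_level {α : Type} (l : List α) (F : List (List Int) → α → List (List Int))
    (Q : α → List Int → Prop) (c : List Int)
    (h : ∀ s v, c ∈ F s v ↔ c ∈ s ∨ Q v c) :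
    ∀ s0, (c ∈ l.foldl F s0 ↔ c ∈ s0 ∨ ∃ v ∈ l, Q v c) := by
  induction l with
  | nil => intro s0; simp
  | cons a t ih =>
    intro s0
    rw [List.foldl_cons, ih, h]
    simp only [List.mem_cons]
    constructor
    · rintro ((hs | hq) | ⟨v, hv, hq⟩)
      · exact Or.inl hs
      · exact Or.inr ⟨a, Or.inl rfl, hq⟩
      · exact Or.inr ⟨v, Or.inr hv, hq⟩
    · rintro (hs | ⟨v, (rfl | hv), hq⟩)
      · exact Or.inl (Or.inl hs)
      · exact Or.inl (Or.inr hq)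
      · exact Or.inr ⟨v, hv, hq⟩

theorem nodup_foldl_level {α : Type} (l : List α) (F : List (List Int) → α → List (List Int))
    (h : ∀ s v, s.Nodup → (F s v).Nodup) :
    ∀ s0, s0.Nodup → (l.foldl F s0).Nodup := by
  induction l with
  | nil => intro s0 h0; simpa using h0
  | cons a t ih => intro s0 h0; rw [List.foldl_cons]; exact ih _ (h _ _ h0)

-- A's new set for one cycle, with the dims of shape-correct input filled in
def bigfoldA (g : List (List Int)) : List (List Int) :=
  (PySem.List.pyRange (mnG g 0 - 1) (mxG g 0 + 2) 1).foldl (fun s x =>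
    (PySem.List.pyRange (mnG g 1 - 1) (mxG g 1 + 2) 1).foldl (fun s y =>
      (PySem.List.pyRange (mnG g 2 - 1) (mxG g 2 + 2) 1).foldl (fun s z =>
        (PySem.List.pyRange (mnG g 3 - 1) (mxG g 3 + 2) 1).foldl (fun s w =>
          let occ := countOcc4 g x y z w
          if [x,y,z,w] ∈ g then
            if occ = 2 ∨ occ = 3 then PySem.Set.add s [x,y,z,w] else s
          else
            if occ = 3 then PySem.Set.add s [x,y,z,w] else s) s) s) s)
    (PySem.Set.empty)

theorem stepA_some (g : List (List Int)) (hne : g ≠ []) (hlen : ∀ r ∈ g, r.length = 4) :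
    stepA g = some (bigfoldA g) := by
  simp only [stepA, getDims4_eq g hne hlen]
  rfl

def aliveA (g : List (List Int)) (x y z w : Int) : Prop :=
  countOcc4 g x y z w = 3 ∨ (countOcc4 g x y z w = 2 ∧ [x,y,z,w] ∈ g)

theorem mem_bigfoldA (g : List (List Int)) (c : List Int) :
    c ∈ bigfoldA g ↔
      ∃ x ∈ PySem.List.pyRange (mnG g 0 - 1) (mxG g 0 + 2) 1,
      ∃ y ∈ PySem.List.pyRange (mnG g 1 - 1) (mxG g 1 + 2) 1,
      ∃ z ∈ PySem.List.pyRange (mnG g 2 - 1) (mxG g 2 + 2) 1,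
      ∃ w ∈ PySem.List.pyRange (mnG g 3 - 1) (mxG g 3 + 2) 1,
        aliveA g x y z w ∧ c = [x,y,z,w] := by
  have h3 : ∀ (x y z : Int) (s : List (List Int)) (w : Int),
      c ∈ (fun (s : List (List Int)) (w : Int) =>
          let occ := countOcc4 g x y z w
          if [x,y,z,w] ∈ g then
            if occ = 2 ∨ occ = 3 then PySem.Set.add s [x,y,z,w] else s
          else
            if occ = 3 then PySem.Set.add s [x,y,z,w] else s) s w
        ↔ c ∈ s ∨ (aliveA g x y z w ∧ c = [x,y,z,w]) := by
    intro x y z s w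
    dsimp only
    split_ifs with h1 h2 h2 <;> simp only [PySem.Set.mem_add, aliveA] <;> tauto
  unfold bigfoldA
  rw [mem_foldl_level _ _
    (fun x c => ∃ y ∈ PySem.List.pyRange (mnG g 1 - 1) (mxG g 1 + 2) 1,
      ∃ z ∈ PySem.List.pyRange (mnG g 2 - 1) (mxG g 2 + 2) 1,
      ∃ w ∈ PySem.List.pyRange (mnG g 3 - 1) (mxG g 3 + 2) 1,
        aliveA g x y z w ∧ c = [x,y,z,w]) c
    (fun s x => mem_foldl_level _ _
      (fun y c => ∃ z ∈ PySem.List.pyRange (mnG g 2 - 1) (mxG g 2 + 2) 1,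
        ∃ w ∈ PySem.List.pyRange (mnG g 3 - 1) (mxG g 3 + 2) 1,
          aliveA g x y z w ∧ c = [x,y,z,w]) c
      (fun s y => mem_foldl_level _ _
        (fun z c => ∃ w ∈ PySem.List.pyRange (mnG g 3 - 1) (mxG g 3 + 2) 1,
            aliveA g x y z w ∧ c = [x,y,z,w]) c
        (fun s z => mem_foldl_level _ _
          (fun w c => aliveA g x y z w ∧ c = [x,y,z,w]) c (h3 x y z) s) s) s)]
  simp [PySem.Set.empty]

theorem nodup_bigfoldA (g : List (List Int)) : (bigfoldA g).Nodup := by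
  unfold bigfoldA
  refine nodup_foldl_level _ _ (fun s x hs => ?_) _ (by simp [PySem.Set.empty])
  refine nodup_foldl_level _ _ (fun s y hs => ?_) _ hs
  refine nodup_foldl_level _ _ (fun s z hs => ?_) _ hs
  refine nodup_foldl_level _ _ (fun s w hs => ?_) _ hs
  dsimp only
  split_ifs <;> first
    | exact PySem.Set.nodup_add _ _ hs
    | exact hs

-- B's one cycle, rewritten through the counter lemmas
theorem stepB_eq_filter (g : List (List Int)) :
    stepB g = (PySem.Set.ofList (g.flatMap genB)).filter
      (fun k => decide ((((g.flatMap genB).count k : Int) = 3 ∨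
        (((g.flatMap genB).count k : Int) = 2 ∧ k ∈ g)))) := by
  show ((((g.flatMap genB).foldl (fun d p => d.insert p (d.getD p 0 + 1))
      (PySem.Dict.empty : PySem.Dict (List Int) Int)).items.filter
        (fun pn => pn.2 = 3 ∨ (pn.2 = 2 ∧ pn.1 ∈ g))).map (fun pn => pn.1)) = _
  rw [PySem.Dict.foldl_insert_getD_add_one_eq_counter, PySem.Dict.items_counter,
    List.filter_map, List.map_map]
  simp only [Function.comp_def]
  simp

theorem nodup_stepB (g : List (List Int)) : (stepB g).Nodup := by
  rw [stepB_eq_filter]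
  exact (PySem.Set.nodup_ofList _).filter _

theorem mem_stepB (g : List (List Int)) (c : List Int) :
    c ∈ stepB g ↔ c ∈ g.flatMap genB ∧
      (((g.flatMap genB).count c : Int) = 3 ∨
        (((g.flatMap genB).count c : Int) = 2 ∧ c ∈ g)) := by
  rw [stepB_eq_filter, List.mem_filter, PySem.Set.mem_ofList, decide_eq_true_eq]

-- every cell adjacent to a live cell lies inside A's scanned box
theorem cover (g : List (List Int)) {p q r s x y z w : Int}
    (hcell : [p,q,r,s] ∈ g) (hadj : [x,y,z,w] ∈ box4 p q r s) :
    x ∈ PySem.List.pyRange (mnG g 0 - 1) (mxG g 0 + 2) 1 ∧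
    y ∈ PySem.List.pyRange (mnG g 1 - 1) (mxG g 1 + 2) 1 ∧
    z ∈ PySem.List.pyRange (mnG g 2 - 1) (mxG g 2 + 2) 1 ∧
    w ∈ PySem.List.pyRange (mnG g 3 - 1) (mxG g 3 + 2) 1 := by
  have h0 := col_bounds g 0 (coord_mem_col g hcell 0)
  have h1 := col_bounds g 1 (coord_mem_col g hcell 1)
  have h2 := col_bounds g 2 (coord_mem_col g hcell 2)
  have h3 := col_bounds g 3 (coord_mem_col g hcell 3)
  simp only [List.getD_cons_zero, List.getD_cons_succ] at h0 h1 h2 h3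
  have hb := mem_box4_quad.mp hadj
  refine ⟨?_, ?_, ?_, ?_⟩ <;> rw [PySem.List.mem_pyRange_one] <;> omega

-- ---- the common membership predicate of all three one-step functions ----
def AliveP (g : List (List Int)) (c : List Int) : Prop :=
  ∃ x y z w : Int, c = [x,y,z,w] ∧
    (countOcc4 g x y z w = 3 ∨ (countOcc4 g x y z w = 2 ∧ c ∈ g))

theorem exists_adj (g : List (List Int)) (x y z w : Int)
    (h : 0 < countOcc4 g x y z w) :
    ∃ m ∈ g, m ∈ box4 x y z w ∧ m ≠ [x,y,z,w] := by
  rw [countOcc4_eq_filter_box] at h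
  have hlen : 0 < ((box4 x y z w).filter
      (fun m => decide (m ∈ g) && decide (m ≠ [x,y,z,w]))).length := by exact_mod_cast h
  obtain ⟨m, hm⟩ := List.exists_mem_of_length_pos hlen
  obtain ⟨hbox, hp⟩ := List.mem_filter.mp hm
  simp only [Bool.and_eq_true, decide_eq_true_eq] at hp
  exact ⟨m, hp.1, hbox, hp.2⟩

theorem occ_pos_of_alive {g : List (List Int)} {x y z w : Int}
    (h : countOcc4 g x y z w = 3 ∨ (countOcc4 g x y z w = 2 ∧ [x,y,z,w] ∈ g)) :
    0 < countOcc4 g x y z w := by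
  rcases h with h | ⟨h, _⟩ <;> omega

theorem mem_bigfoldA_alive (g : List (List Int)) (hlen : ∀ r ∈ g, r.length = 4)
    (c : List Int) : c ∈ bigfoldA g ↔ AliveP g c := by
  rw [mem_bigfoldA]
  constructor
  · rintro ⟨x, _, y, _, z, _, w, _, hal, rfl⟩
    exact ⟨x, y, z, w, rfl, hal⟩
  · rintro ⟨x, y, z, w, rfl, hal⟩
    obtain ⟨m, hmg, hmbox, _⟩ := exists_adj g x y z w (occ_pos_of_alive hal)
    obtain ⟨p, q, r, s, rfl⟩ := len4_shape (hlen m hmg)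
    have hcov := cover g hmg (box4_symm.mp hmbox)
    exact ⟨x, hcov.1, y, hcov.2.1, z, hcov.2.2.1, w, hcov.2.2.2, hal, rfl⟩

theorem mem_stepB_alive (g : List (List Int)) (hnd : g.Nodup)
    (hlen : ∀ r ∈ g, r.length = 4) (c : List Int) : c ∈ stepB g ↔ AliveP g c := by
  rw [mem_stepB]
  constructor
  · rintro ⟨hmem, hcond⟩
    obtain ⟨cell, hcellg, hcgen⟩ := List.mem_flatMap.mp hmem
    obtain ⟨p, q, r, s, rfl⟩ := len4_shape (hlen cell hcellg)
    rw [genB_eq] at hcgen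
    obtain ⟨hbox, _⟩ := List.mem_filter.mp hcgen
    obtain ⟨x, y, z, w, rfl, _⟩ := mem_box4.mp hbox
    rw [count_contribs g hnd hlen x y z w] at hcond
    exact ⟨x, y, z, w, rfl, hcond⟩
  · rintro ⟨x, y, z, w, rfl, hal⟩
    obtain ⟨m, hmg, hmbox, hmne⟩ := exists_adj g x y z w (occ_pos_of_alive hal)
    obtain ⟨p, q, r, s, rfl⟩ := len4_shape (hlen m hmg)
    refine ⟨List.mem_flatMap.mpr ⟨[p,q,r,s], hmg, ?_⟩, ?_⟩
    · rw [genB_eq]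
      exact List.mem_filter.mpr ⟨box4_symm.mp hmbox,
        by simp only [decide_eq_true_eq]; exact fun h => hmne h.symm⟩
    · rw [count_contribs g hnd hlen x y z w]
      exact hal

theorem occL_eq (g : List (List Int)) (hnd : g.Nodup) (x y z w : Int) :
    ((occL g [x,y,z,w] : Nat) : Int) = countOcc4 g x y z w := by
  have hocc : occL g [x,y,z,w]
      = (g.filter (fun m => decide (m ∈ box4 x y z w) && decide (m ≠ [x,y,z,w]))).length := by
    simp [occL]
  rw [hocc, length_filter_mem_comm g (box4 x y z w) (fun m => decide (m ≠ [x,y,z,w]))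
    hnd (nodup_box4 x y z w), countOcc4_eq_filter_box]

theorem mem_lifeNext_alive (g : List (List Int)) (hnd : g.Nodup)
    (hlen : ∀ r ∈ g, r.length = 4) (c : List Int) : c ∈ lifeNext g ↔ AliveP g c := by
  unfold lifeNext
  rw [List.mem_filter, List.mem_dedup, List.mem_flatMap, decide_eq_true_eq]
  constructor
  · rintro ⟨⟨m, hmg, hc⟩, hcond⟩
    obtain ⟨p, q, r, s, rfl⟩ := len4_shape (hlen m hmg)
    simp only [List.getD_cons_zero, List.getD_cons_succ] at hc
    obtain ⟨x, y, z, w, rfl, _⟩ := mem_box4.mp hc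
    refine ⟨x, y, z, w, rfl, ?_⟩
    have he := occL_eq g hnd x y z w
    rcases hcond with h | ⟨h, hm⟩
    · exact Or.inl (by omega)
    · exact Or.inr ⟨by omega, hm⟩
  · rintro ⟨x, y, z, w, rfl, hal⟩
    obtain ⟨m, hmg, hmbox, _⟩ := exists_adj g x y z w (occ_pos_of_alive hal)
    obtain ⟨p, q, r, s, rfl⟩ := len4_shape (hlen m hmg)
    have he := occL_eq g hnd x y z w
    refine ⟨⟨[p,q,r,s], hmg, ?_⟩, ?_⟩
    · simp only [List.getD_cons_zero, List.getD_cons_succ]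
      exact box4_symm.mp hmbox
    · rcases hal with h | ⟨h, hm⟩
      · exact Or.inl (by omega)
      · exact Or.inr ⟨by omega, hm⟩

theorem countOcc4_congr (g g' : List (List Int)) (x y z w : Int)
    (h : ∀ m : List Int, m ∈ g ↔ m ∈ g') :
    countOcc4 g x y z w = countOcc4 g' x y z w := by
  rw [countOcc4_eq_filter_box, countOcc4_eq_filter_box]
  congr 2
  apply List.filter_congr
  intro m _
  rw [decide_eq_decide.mpr (h m)]

theorem AliveP_congr (g g' : List (List Int)) (h : ∀ m : List Int, m ∈ g ↔ m ∈ g')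
    (c : List Int) : AliveP g c ↔ AliveP g' c := by
  unfold AliveP
  constructor <;> rintro ⟨x, y, z, w, rfl, hal⟩ <;> refine ⟨x, y, z, w, rfl, ?_⟩
  · rw [countOcc4_congr g g' x y z w h] at hal
    rcases hal with h1 | ⟨h1, h2⟩
    · exact Or.inl h1
    · exact Or.inr ⟨h1, (h _).mp h2⟩
  · rw [← countOcc4_congr g g' x y z w h] at hal
    rcases hal with h1 | ⟨h1, h2⟩
    · exact Or.inl h1
    · exact Or.inr ⟨h1, (h _).mpr h2⟩

-- ---- shape invariants of the three one-step functions ----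
theorem nodup_lifeNext (g : List (List Int)) : (lifeNext g).Nodup :=
  (List.nodup_dedup _).filter _

theorem len4_lifeNext (g : List (List Int)) : ∀ c ∈ lifeNext g, c.length = 4 := by
  intro c hc
  unfold lifeNext at hc
  obtain ⟨hc, _⟩ := List.mem_filter.mp hc
  obtain ⟨m, _, hm⟩ := List.mem_flatMap.mp (List.mem_dedup.mp hc)
  obtain ⟨a, b, c', d, rfl, _⟩ := mem_box4.mp hm
  rfl

theorem genB_mem_len4 (m c : List Int) (h : c ∈ genB m) : c.length = 4 := by
  rcases m with _ | ⟨x, m⟩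
  · simp [genB] at h
  rcases m with _ | ⟨y, m⟩
  · simp [genB] at h
  rcases m with _ | ⟨z, m⟩
  · simp [genB] at h
  rcases m with _ | ⟨w, m⟩
  · simp [genB] at h
  rcases m with _ | ⟨v, m⟩
  · rw [genB_eq] at h
    obtain ⟨a, b, c', d, rfl, _⟩ := mem_box4.mp (List.mem_filter.mp h).1
    rfl
  · simp [genB] at h

theorem len4_stepB (g : List (List Int)) : ∀ c ∈ stepB g, c.length = 4 := by
  intro c hc
  obtain ⟨hmem, _⟩ := (mem_stepB g c).mp hc
  obtain ⟨m, _, hm⟩ := List.mem_flatMap.mp hmem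
  exact genB_mem_len4 m c hm

theorem len4_bigfoldA (g : List (List Int)) : ∀ c ∈ bigfoldA g, c.length = 4 := by
  intro c hc
  obtain ⟨x, _, y, _, z, _, w, _, _, rfl⟩ := (mem_bigfoldA g c).mp hc
  rfl

-- ---- folds over range(cycles) are function iteration ----
theorem foldA_iterate (l : List Int) (s : Option (List (List Int))) :
    l.foldl (fun (o : Option (List (List Int))) _ => o.bind stepA) s
      = (fun o : Option (List (List Int)) => o.bind stepA)^[l.length] s := by
  induction l generalizing s with
  | nil => rfl
  | cons a t ih =>
    rw [List.foldl_cons, ih, List.length_cons, ← Function.iterate_succ_apply]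

theorem foldB_iterate (l : List Int) (s : List (List Int)) :
    l.foldl (fun cur _ => stepB cur) s = stepB^[l.length] s := by
  induction l generalizing s with
  | nil => rfl
  | cons a t ih =>
    rw [List.foldl_cons, ih, List.length_cons, ← Function.iterate_succ_apply]

-- the early-exit Boolean of Pre_ says exactly: alive at every step strictly before the n-th
theorem surviveB_iff (g : List (List Int)) (n : Nat) :
    surviveB g n = true ↔ ∀ k, k < n → lifeNext^[k] g ≠ [] := by
  induction n generalizing g with
  | zero => simp [surviveB]
  | succ n ih =>
    rw [surviveB, Bool.and_eq_true, Bool.not_eq_true', List.isEmpty_eq_false_iff, ih]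
    constructor
    · rintro ⟨hne, htail⟩ k hk
      cases k with
      | zero => simpa using hne
      | succ k =>
        rw [Function.iterate_succ_apply]
        exact htail k (by omega)
    · intro h
      refine ⟨by simpa using h 0 (by omega), fun k hk => ?_⟩
      rw [← Function.iterate_succ_apply]
      exact h (k + 1) (by omega)

-- the simultaneous invariant on A's state, B's state and the spec-level evolution
theorem stages (g : List (List Int)) (hnd : g.Nodup) (hlen : ∀ r ∈ g, r.length = 4) :
    ∀ n : Nat, (∀ k, k < n → lifeNext^[k] g ≠ []) →
      ∃ S : List (List Int),
        (fun o : Option (List (List Int)) => o.bind stepA)^[n] (some g) = some S ∧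
        S.Perm (lifeNext^[n] g) ∧ S.Nodup ∧ (∀ r ∈ S, r.length = 4) ∧
        (stepB^[n] g).Perm (lifeNext^[n] g) ∧ (stepB^[n] g).Nodup ∧
        (∀ r ∈ stepB^[n] g, r.length = 4) ∧
        (lifeNext^[n] g).Nodup ∧ (∀ r ∈ lifeNext^[n] g, r.length = 4) := by
  intro n
  induction n with
  | zero =>
    intro _
    exact ⟨g, rfl, List.Perm.refl g, hnd, hlen, List.Perm.refl g, hnd, hlen, hnd, hlen⟩
  | succ n ih =>
    intro hsur
    obtain ⟨S, hSeq, hSperm, hSnd, hSlen, hTperm, hTnd, hTlen, hLnd, hLlen⟩ :=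
      ih (fun k hk => hsur k (hk.trans (Nat.lt_succ_self n)))
    have hLne : lifeNext^[n] g ≠ [] := hsur n (Nat.lt_succ_self n)
    have hSne : S ≠ [] := fun h => hLne ((h ▸ hSperm).symm.eq_nil)
    have hmemSL : ∀ m : List Int, m ∈ S ↔ m ∈ lifeNext^[n] g := fun m => hSperm.mem_iff
    have hmemTL : ∀ m : List Int, m ∈ stepB^[n] g ↔ m ∈ lifeNext^[n] g :=
      fun m => hTperm.mem_iff
    refine ⟨bigfoldA S, ?_, ?_, nodup_bigfoldA S, len4_bigfoldA S, ?_, ?_, ?_, ?_, ?_⟩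
    · rw [Function.iterate_succ_apply', hSeq]
      show (stepA S) = some (bigfoldA S)
      exact stepA_some S hSne hSlen
    · rw [Function.iterate_succ_apply']
      refine (List.perm_ext_iff_of_nodup (nodup_bigfoldA S) (nodup_lifeNext _)).mpr ?_
      intro c
      rw [mem_bigfoldA_alive S hSlen c, mem_lifeNext_alive _ hLnd hLlen c]
      exact AliveP_congr S _ hmemSL c
    · rw [Function.iterate_succ_apply', Function.iterate_succ_apply']
      refine (List.perm_ext_iff_of_nodup (nodup_stepB _) (nodup_lifeNext _)).mpr ?_
      intro c
      rw [mem_stepB_alive _ hTnd hTlen c, mem_lifeNext_alive _ hLnd hLlen c]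
      exact AliveP_congr _ _ hmemTL c
    · rw [Function.iterate_succ_apply']
      exact nodup_stepB _
    · rw [Function.iterate_succ_apply']
      exact len4_stepB _
    · rw [Function.iterate_succ_apply']
      exact nodup_lifeNext _
    · rw [Function.iterate_succ_apply']
      exact len4_lifeNext _

-- ===== VERDICT (by name: the statement is the Claim_ definition above) =====
theorem run_4d_spec : Claim_equal_run_4d := by
  intro grid cycles _ hpre
  unfold Spec_run_4d
  by_cases hc : cycles ≤ 0
  · have hr : PySem.List.pyRange 0 cycles 1 = [] := PySem.List.pyRange_one_eq_nil (by omega)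
    simp [run_4d, run_4d_alt, hr]
  · simp only [Pre_run_4d, Bool.or_eq_true, Bool.and_eq_true, decide_eq_true_eq,
      List.all_eq_true, beq_iff_eq] at hpre
    rcases hpre with h | ⟨⟨hnd, hlen⟩, hsurB⟩
    · omega
    have hsur : ∀ k, k < cycles.toNat → lifeNext^[k] grid ≠ [] :=
      (surviveB_iff grid cycles.toNat).mp hsurB
    have hN : (PySem.List.pyRange 0 cycles 1).length = cycles.toNat := by
      rw [PySem.List.length_pyRange_one]
      omega
    obtain ⟨S, hSeq, hSperm, _, _, hTperm, _, _, _, _⟩ :=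
      stages grid hnd hlen cycles.toNat hsur
    have hA : run_4d grid cycles = (S.length : Int) := by
      unfold run_4d
      rw [foldA_iterate, hN, hSeq]
    have hB : run_4d_alt grid cycles = ((stepB^[cycles.toNat] grid).length : Int) := by
      unfold run_4d_alt
      rw [foldB_iterate, hN]
    rw [hA, hB, hSperm.length_eq, ← hTperm.length_eq]
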